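-- pv_equiv track=rewrite | github.com/it-teaching-abo-akademi/assignment-1-crcz25 | stepcounter.py | generate_step_array
-- ===== SOURCE A (Python) =====
-- def generate_step_array(timestamps, step_time):
--     s_arr = []
--     ctr = 0
--     for i, time in enumerate(timestamps):
--         if ctr < len(step_time) and step_time[ctr] <= time:
--             ctr += 1
--             s_arr.append(100)
--         else:
--             s_arr.append(0)
--     while len(s_arr) < len(timestamps):
--         s_arr.append(0)
--     return s_arr
-- ===== SOURCE B (Python) =====
-- def generate_step_array(timestamps, step_time):
--     result = [0] * len(timestamps)
--     ti = 0
--     for st in step_time: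
--         while ti < len(timestamps) and timestamps[ti] < st:
--             ti += 1
--         if ti < len(timestamps):
--             result[ti] = 100
--             ti += 1
--         else:
--             break
--     return result
-- ===== Notes on version B (the rewrite author's own statement) =====
-- stated objective: alternative
-- what changed: B pre-fills the result with zeros and drives the outer loop by step_time with a timestamp pointer advanced by an inner while, instead of A's single pass over timestamps with a step counter and appends.
import Mathlib
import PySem

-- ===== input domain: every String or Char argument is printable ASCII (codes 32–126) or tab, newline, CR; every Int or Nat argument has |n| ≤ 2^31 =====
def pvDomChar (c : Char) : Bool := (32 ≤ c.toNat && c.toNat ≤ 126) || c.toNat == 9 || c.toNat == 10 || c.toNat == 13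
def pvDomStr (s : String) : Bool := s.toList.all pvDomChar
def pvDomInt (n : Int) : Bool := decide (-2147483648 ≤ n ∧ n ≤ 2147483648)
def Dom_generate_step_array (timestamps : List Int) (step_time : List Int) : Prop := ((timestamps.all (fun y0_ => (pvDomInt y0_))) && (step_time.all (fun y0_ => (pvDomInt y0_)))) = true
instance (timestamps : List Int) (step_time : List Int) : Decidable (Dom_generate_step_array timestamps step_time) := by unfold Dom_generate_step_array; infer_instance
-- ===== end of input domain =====

-- B reverses which list drives the loop: it pre-fills zeros and, per step value,
-- advances a timestamp pointer with an inner while before writing 100 (objective: alternative).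

-- ===== PORT A =====
-- the 'for i, time in enumerate(timestamps)' loop (index i is unused)
def loopA (ss : List Int) (ts : List Int) (ctr : Nat) (s_arr : List Int) : List Int :=
  match ts with
  | [] => s_arr
  | t :: rest =>
    if h : ctr < ss.length then
      if ss[ctr] ≤ t then loopA ss rest (ctr + 1) (s_arr ++ [100])
      else loopA ss rest ctr (s_arr ++ [0])
    else loopA ss rest ctr (s_arr ++ [0])

-- the trailing 'while len(s_arr) < len(timestamps): s_arr.append(0)' loop
def padA (n : Nat) (s : List Int) : List Int :=
  if s.length < n then padA n (s ++ [0]) else s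
termination_by n - s.length
decreasing_by simp; omega

def generate_step_array (timestamps : List Int) (step_time : List Int) : List Int :=
  padA timestamps.length (loopA step_time timestamps 0 [])

-- ===== PORT B =====
-- the inner 'while ti < len(timestamps) and timestamps[ti] < st: ti += 1'
def advanceB (ts : List Int) (st : Int) (ti : Nat) : Nat :=
  if h : ti < ts.length then
    if ts[ti] < st then advanceB ts st (ti + 1) else ti
  else ti
termination_by ts.length - ti

-- the outer 'for st in step_time' loop mutating result
def loopB (ts : List Int) (steps : List Int) (res : List Int) (ti : Nat) : List Int :=
  match steps with
  | [] => res
  | st :: rest =>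
    let ti' := advanceB ts st ti
    if ti' < ts.length then loopB ts rest (res.set ti' 100) (ti' + 1) else res

def generate_step_array_alt (timestamps : List Int) (step_time : List Int) : List Int :=
  loopB timestamps step_time (List.replicate timestamps.length 0) 0

-- ===== PRECONDITION & SPEC =====
def Spec_generate_step_array (timestamps : List Int) (step_time : List Int) (out : List Int) : Prop := out = generate_step_array_alt timestamps step_time
instance (timestamps : List Int) (step_time : List Int) (out : List Int) : Decidable (Spec_generate_step_array timestamps step_time out) := by unfold Spec_generate_step_array; infer_instance

-- ===== CLAIM (what is proved, stated in full; the proofs are below) =====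
def Claim_equal_generate_step_array : Prop := ∀ (timestamps : List Int) (step_time : List Int), Dom_generate_step_array timestamps step_time → Spec_generate_step_array timestamps step_time (generate_step_array timestamps step_time)

-- ===== LEMMAS AND PROOFS =====

-- common reference function: two-pointer merge of timestamps against steps
def merge : List Int → List Int → List Int
  | [], _ => []
  | _ :: ts, [] => 0 :: merge ts []
  | t :: ts, s :: ss => if s ≤ t then 100 :: merge ts ss else 0 :: merge ts (s :: ss)

theorem merge_nil (ts : List Int) : merge ts [] = List.replicate ts.length 0 := by
  induction ts with
  | nil => rfl
  | cons t ts ih => simp [merge, ih, List.replicate]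

theorem merge_length (ts ss : List Int) : (merge ts ss).length = ts.length := by
  induction ts generalizing ss with
  | nil => rfl
  | cons t ts ih =>
    cases ss with
    | nil => simp [merge, ih]
    | cons s ss => simp only [merge]; split <;> simp [ih]

theorem loopA_eq (ts : List Int) : ∀ (ss : List Int) (ctr : Nat) (acc : List Int),
    loopA ss ts ctr acc = acc ++ merge ts (ss.drop ctr) := by
  induction ts with
  | nil => intro ss ctr acc; simp [loopA, merge]
  | cons t ts ih =>
    intro ss ctr acc
    by_cases h : ctr < ss.length
    · have hd : ss.drop ctr = ss[ctr] :: ss.drop (ctr + 1) :=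
        List.drop_eq_getElem_cons h
      by_cases hle : ss[ctr] ≤ t
      · simp only [loopA, dif_pos h, if_pos hle, ih, hd, merge]
        simp
      · simp only [loopA, dif_pos h, if_neg hle, ih, hd, merge]
        simp
    · have hd : ss.drop ctr = [] := List.drop_eq_nil_of_le (by omega)
      simp [loopA, h, ih, hd, merge]

theorem padA_eq (n : Nat) (s : List Int) (h : s.length = n) : padA n s = s := by
  unfold padA; simp [h]

theorem advanceB_ge (ts : List Int) (st : Int) (ti : Nat) : ti ≤ advanceB ts st ti := by
  fun_induction advanceB with
  | case1 => omega
  | case2 => omega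
  | case3 => omega

theorem advanceB_le (ts : List Int) (st : Int) (ti : Nat) (h : ti ≤ ts.length) :
    advanceB ts st ti ≤ ts.length := by
  fun_induction advanceB with
  | case1 ti h' hlt ih => exact ih (by omega)
  | case2 => omega
  | case3 => omega

theorem merge_advance (ts : List Int) (st : Int) (rest : List Int) : ∀ (ti : Nat),
    merge (ts.drop ti) (st :: rest) =
      if advanceB ts st ti < ts.length then
        List.replicate (advanceB ts st ti - ti) 0
          ++ 100 :: merge (ts.drop (advanceB ts st ti + 1)) rest
      else List.replicate (ts.length - ti) 0 := by
  intro ti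
  fun_induction advanceB ts st ti with
  | case1 ti h hlt ih =>
    have hd : ts.drop ti = ts[ti] :: ts.drop (ti + 1) := List.drop_eq_getElem_cons h
    have hge := advanceB_ge ts st (ti + 1)
    rw [hd]
    simp only [merge, if_neg (by omega : ¬ st ≤ ts[ti])]
    rw [ih]
    split
    · rw [show advanceB ts st (ti + 1) - ti = (advanceB ts st (ti + 1) - (ti + 1)) + 1 by omega]
      simp [List.replicate_succ]
    · rw [show ts.length - ti = (ts.length - (ti + 1)) + 1 by omega]
      simp [List.replicate_succ]
  | case2 ti h hlt =>
    have hd : ts.drop ti = ts[ti] :: ts.drop (ti + 1) := List.drop_eq_getElem_cons h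
    rw [hd]
    simp only [merge, if_pos (by omega : st ≤ ts[ti]), if_pos h]
    simp
  | case3 ti h =>
    have hd : ts.drop ti = [] := List.drop_eq_nil_of_le (by omega)
    simp only [hd, merge]
    rw [if_neg h, show ts.length - ti = 0 by omega]
    rfl

theorem loopB_eq (ts : List Int) (steps : List Int) : ∀ (ti : Nat) (res : List Int),
    res.length = ts.length → ti ≤ ts.length →
    res.drop ti = List.replicate (ts.length - ti) 0 →
    loopB ts steps res ti = res.take ti ++ merge (ts.drop ti) steps := by
  induction steps with
  | nil =>
    intro ti res hlen hti hz
    simp only [loopB, merge_nil, List.length_drop]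
    rw [← hz, List.take_append_drop]
  | cons st rest ih =>
    intro ti res hlen hti hz
    have hge := advanceB_ge ts st ti
    have hle := advanceB_le ts st ti hti
    set ti' := advanceB ts st ti with hti'
    simp only [loopB, ← hti']
    rw [merge_advance]
    by_cases h : ti' < ts.length
    · rw [if_pos h, if_pos h]
      -- facts about res's zero suffix
      have hres_take : res.take ti' = res.take ti ++ List.replicate (ti' - ti) 0 := by
        have e : res.take (ti + (ti' - ti)) = res.take ti ++ (res.drop ti).take (ti' - ti) :=
          List.take_add
        rw [show ti' = ti + (ti' - ti) by omega, e, hz, List.take_replicate]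
        congr 2
        omega
      have hset : (res.set ti' 100).drop (ti' + 1) = List.replicate (ts.length - (ti' + 1)) 0 := by
        rw [List.drop_set_of_lt (by omega : ti' < ti' + 1)]
        have : res.drop (ti' + 1) = (res.drop ti).drop (ti' + 1 - ti) := by
          rw [List.drop_drop]; congr 1; omega
        rw [this, hz, List.drop_replicate]
        congr 1; omega
      rw [ih (ti' + 1) (res.set ti' 100) (by simp [hlen]) (by omega) hset]
      have htk : (res.set ti' 100).take (ti' + 1)
          = res.take ti ++ List.replicate (ti' - ti) 0 ++ [(100 : Int)] := by
        rw [List.take_add_one, List.take_set_of_le (le_refl ti'), hres_take,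
          List.getElem?_set_self (by simp [hlen]; omega)]
        rfl
      rw [htk, ← hti']
      simp
    · rw [if_neg h, if_neg h]
      rw [← hz]
      exact (List.take_append_drop ti res).symm

-- ===== VERDICT (by name: the statement is the Claim_ definition above) =====
theorem generate_step_array_spec : Claim_equal_generate_step_array := by
  intro ts ss _
  show generate_step_array ts ss = generate_step_array_alt ts ss
  unfold generate_step_array generate_step_array_alt
  rw [loopA_eq, loopB_eq ts ss 0 _ (by simp) (by omega) (by simp)]
  simp only [List.drop_zero, List.nil_append, List.take_zero]
  exact padA_eq _ _ (merge_length ts ss)
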